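-- pv_equiv track=rewrite | github.com/MS-ASE-2020/team-ai-music | ai_music_backend/backend/generate_melody.py | get_pitch_duration_structure
-- ===== SOURCE A (Python) =====
-- def get_pitch_duration_structure(note_seq):
--     seq = []
--
--     # 遍历寻找pitch-duration的结构
--     # 当有不合法情况出现时，找最后一个pitch和第一个duration，保证其相邻
--     # p1 d1 p2 p3 d2 p4 d3-> p1 d1 p3 d1 p4 d3
--     # p1 d1 p2 d2 d3 p3 d4-> p1 d1 p2 d2 p3 d4
--     # p1 d1 p2 p3 d2 d3 p4 d4 -> p1 d1 p3 d2 p4 d4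
--
--     i = 0
--     while (i < len(note_seq)):
--         if note_seq[i] > 128:
--             # Duration
--             i += 1
--             continue
--         else:
--             # Pitch
--             if i+1 >= len(note_seq):
--                 # No Duration Followed
--                 break
--             if note_seq[i+1] <= 128:
--                 # Followed by a pitch
--                 i += 1
--                 continue
--
--             # Here trans back to str for bleu calculate
--             pitch = str(note_seq[i])
--             duration = str(note_seq[i+1])
--
--             seq.append(pitch)
--             seq.append(duration)
--             i += 2
--     return seq
-- ===== SOURCE B (Python) =====
-- def get_pitch_duration_structure(note_seq):
--     seq = []
--     pending = None
--     for x in note_seq: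
--         if x > 128:
--             if pending is not None:
--                 seq.append(str(pending))
--                 seq.append(str(x))
--                 pending = None
--         else:
--             pending = x
--     return seq
-- ===== Notes on version B (the rewrite author's own statement) =====
-- stated objective: simpler
-- what changed: Replaced the index-based while loop with lookahead and i+=2 jumps by a single forward for-loop maintaining one 'pending pitch' variable, emitting a pair when a duration arrives while a pitch is pending.
import Mathlib
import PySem

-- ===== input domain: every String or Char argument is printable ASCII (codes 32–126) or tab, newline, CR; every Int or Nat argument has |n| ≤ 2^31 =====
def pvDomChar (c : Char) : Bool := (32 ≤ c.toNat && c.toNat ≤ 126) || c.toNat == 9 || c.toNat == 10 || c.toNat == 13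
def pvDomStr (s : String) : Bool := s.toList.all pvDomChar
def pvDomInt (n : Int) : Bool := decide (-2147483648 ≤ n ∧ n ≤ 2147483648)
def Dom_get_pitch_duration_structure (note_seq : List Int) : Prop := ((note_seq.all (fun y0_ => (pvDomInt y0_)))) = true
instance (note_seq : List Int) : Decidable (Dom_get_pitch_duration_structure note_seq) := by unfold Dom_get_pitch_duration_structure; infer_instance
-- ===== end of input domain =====

-- B replaces A's index+lookahead while loop by a single forward pass with one pending-pitch variable (simpler; same O(n) cost).

-- ===== PORT A =====
-- A's while loop over index i, transcribed as recursion on the remaining suffix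
-- (i += 1 → drop one element, i += 2 → drop two), with the accumulating seq.
def pvGoA : List Int → List String → List String
  | [], acc => acc
  | x :: rest, acc =>
    if x > 128 then
      pvGoA rest acc                 -- Duration: i += 1
    else
      match rest with
      | [] => acc                    -- No Duration Followed: break
      | y :: rest2 =>
        if y ≤ 128 then
          pvGoA (y :: rest2) acc     -- Followed by a pitch: i += 1
        else
          pvGoA rest2 (acc ++ [PySem.Int.toStr x, PySem.Int.toStr y])  -- append pitch, duration; i += 2

def get_pitch_duration_structure (note_seq : List Int) : List String :=
  pvGoA note_seq []

-- ===== PORT B =====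
-- B's single for-loop with a pending-pitch Option, as a fold-style recursion.
def pvGoB : List Int → Option Int → List String → List String
  | [], _, acc => acc
  | x :: rest, pending, acc =>
    if x > 128 then
      match pending with
      | some p => pvGoB rest none (acc ++ [PySem.Int.toStr p, PySem.Int.toStr x])
      | none => pvGoB rest none acc
    else
      pvGoB rest (some x) acc

def get_pitch_duration_structure_alt (note_seq : List Int) : List String :=
  pvGoB note_seq none []

-- ===== PRECONDITION & SPEC =====
def Spec_get_pitch_duration_structure (note_seq : List Int) (out : List String) : Prop := out = get_pitch_duration_structure_alt note_seq
instance (note_seq : List Int) (out : List String) : Decidable (Spec_get_pitch_duration_structure note_seq out) := by unfold Spec_get_pitch_duration_structure; infer_instance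

-- ===== CLAIM (what is proved, stated in full; the proofs are below) =====
def Claim_equal_get_pitch_duration_structure : Prop := ∀ (note_seq : List Int), Dom_get_pitch_duration_structure note_seq → Spec_get_pitch_duration_structure note_seq (get_pitch_duration_structure note_seq)

-- ===== LEMMAS AND PROOFS =====
-- Joint invariant: B with no pending pitch matches A at the same suffix, and B with
-- pending pitch p (p ≤ 128) matches A restarted at p :: suffix.
theorem pvGoA_eq_pvGoB (l : List Int) :
    (∀ acc, pvGoA l acc = pvGoB l none acc) ∧
    (∀ p, p ≤ 128 → ∀ acc, pvGoA (p :: l) acc = pvGoB l (some p) acc) := by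
  induction l with
  | nil =>
    constructor
    · intro acc; rfl
    · intro p hp acc
      rw [pvGoA.eq_def]
      simp [not_lt.mpr hp, pvGoB]
  | cons y r ih =>
    constructor
    · intro acc
      by_cases hy : y > 128
      · rw [pvGoA.eq_def, pvGoB.eq_def]
        simp only [if_pos hy]
        exact ih.1 acc
      · rw [pvGoB.eq_def]
        simp only [if_neg hy]
        exact ih.2 y (not_lt.mp hy) acc
    · intro p hp acc
      rw [pvGoA.eq_def, pvGoB.eq_def]
      by_cases hy : y > 128
      · simp only [if_neg (not_lt.mpr hp), if_neg (not_le.mpr hy), if_pos hy]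
        exact ih.1 _
      · simp only [if_neg (not_lt.mpr hp), if_pos (not_lt.mp hy), if_neg hy]
        exact ih.2 y (not_lt.mp hy) acc

-- ===== VERDICT (by name: the statement is the Claim_ definition above) =====
theorem get_pitch_duration_structure_spec : Claim_equal_get_pitch_duration_structure := by
  intro l _
  unfold Spec_get_pitch_duration_structure get_pitch_duration_structure get_pitch_duration_structure_alt
  exact (pvGoA_eq_pvGoB l).1 []
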